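-- pv_equiv track=rewrite | github.com/vinceburns/fantasyfb | draft.py | is_fzfmatch
-- ===== SOURCE A (Python) =====
-- def is_fzfmatch(match_str, check_str):
--     for match_char in range(0, len(match_str)):
--         found = 0
--         for check_char in range(0, len(check_str)):
--             if match_str[match_char] == check_str[check_char]:
--                 #we found this char trucate string and move to next match char
--                 found = 1
--                 if check_char != len(check_str):
--                     check_str = check_str[check_char::]
--                 break
--         if found == 0:
--             return False
--     return True
-- ===== SOURCE B (Python) =====
-- def is_fzfmatch(match_str, check_str):
--     # One shared pointer over check_str; each match char advances it to the
--     # first position >= current (non-strict, matching A's slice-from-found-char).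
--     j = 0
--     n = len(check_str)
--     for c in match_str:
--         while j < n and check_str[j] != c:
--             j += 1
--         if j == n:
--             return False
--     return True
-- ===== Notes on version B (the rewrite author's own statement) =====
-- stated objective: faster
-- what changed: Replaces the per-match-char rescan with repeated string slicing by a single shared two-pointer scan that advances one index over check_str (non-strict), removing the inner scan and all slice copies.
import Mathlib
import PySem

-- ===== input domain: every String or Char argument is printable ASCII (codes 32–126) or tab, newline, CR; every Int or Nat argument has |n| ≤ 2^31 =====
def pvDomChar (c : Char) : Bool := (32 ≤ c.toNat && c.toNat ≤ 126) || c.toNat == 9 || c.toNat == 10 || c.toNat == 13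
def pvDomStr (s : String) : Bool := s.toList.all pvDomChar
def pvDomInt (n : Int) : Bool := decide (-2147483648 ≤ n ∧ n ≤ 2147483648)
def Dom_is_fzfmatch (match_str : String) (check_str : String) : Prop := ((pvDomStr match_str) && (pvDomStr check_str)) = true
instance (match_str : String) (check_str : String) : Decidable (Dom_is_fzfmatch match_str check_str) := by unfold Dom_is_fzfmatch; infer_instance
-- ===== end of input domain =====

-- B replaces A's per-match-char rescan (with string re-slicing) by a single shared
-- index advancing non-strictly over check_str; objective: faster (O(n+m) vs O(n*m)).

-- ===== PORT A =====
-- inner 'for check_char in range(0, len(check_str))' scan: first index where the char matches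
def pvFindIdx (c : Char) : List Char → Option Nat
  | [] => none
  | d :: ds => if d = c then some 0 else (pvFindIdx c ds).map (· + 1)

-- outer loop over match_str's chars, re-binding check_str to its slice from the found index
-- (check_str[check_char::] with 0 ≤ check_char < len = List.drop check_char)
def pvAGo : List Char → List Char → Bool
  | [], _ => true
  | m :: ms, cs =>
    match pvFindIdx m cs with
    | none => false
    | some i => pvAGo ms (cs.drop i)

def is_fzfmatch (match_str : String) (check_str : String) : Bool :=
  pvAGo match_str.toList check_str.toList

-- ===== PORT B =====
-- 'while j < n and check_str[j] != c: j += 1'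
def pvAdvance (c : Char) (cs : List Char) (j : Nat) : Nat :=
  if h : j < cs.length then
    if cs[j] = c then j else pvAdvance c cs (j + 1)
  else j
termination_by cs.length - j

-- 'for c in match_str' with the shared pointer j
def pvBGo (cs : List Char) : List Char → Nat → Bool
  | [], _ => true
  | c :: ms, j =>
    let j' := pvAdvance c cs j
    if j' = cs.length then false else pvBGo cs ms j'

def is_fzfmatch_alt (match_str : String) (check_str : String) : Bool :=
  pvBGo check_str.toList match_str.toList 0

-- ===== PRECONDITION & SPEC =====
def Spec_is_fzfmatch (match_str : String) (check_str : String) (out : Bool) : Prop := out = is_fzfmatch_alt match_str check_str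
instance (match_str : String) (check_str : String) (out : Bool) : Decidable (Spec_is_fzfmatch match_str check_str out) := by unfold Spec_is_fzfmatch; infer_instance

-- ===== CLAIM (what is proved, stated in full; the proofs are below) =====
def Claim_equal_is_fzfmatch : Prop := ∀ (match_str : String) (check_str : String), Dom_is_fzfmatch match_str check_str → Spec_is_fzfmatch match_str check_str (is_fzfmatch match_str check_str)

-- ===== LEMMAS AND PROOFS =====

theorem pvFindIdx_lt {c : Char} {l : List Char} {i : Nat}
    (h : pvFindIdx c l = some i) : i < l.length := by
  induction l generalizing i with
  | nil => simp [pvFindIdx] at h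
  | cons d ds ih =>
    by_cases hd : d = c
    · simp [pvFindIdx, hd] at h
      simp
      omega
    · simp [pvFindIdx, hd, Option.map_eq_some_iff] at h
      obtain ⟨i', hi', rfl⟩ := h
      have := ih hi'
      simp; omega

-- advance from p behaves as the inner scan of A on the suffix cs.drop p
theorem pvAdvance_eq_find (c : Char) (cs : List Char) (p : Nat) (hp : p ≤ cs.length) :
    (match pvFindIdx c (cs.drop p) with
      | none => pvAdvance c cs p = cs.length
      | some i => pvAdvance c cs p = p + i) := by
  by_cases h : p < cs.length
  · have hdrop : cs.drop p = cs[p] :: cs.drop (p + 1) := List.drop_eq_getElem_cons h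
    by_cases hc : cs[p] = c
    · rw [hdrop]
      simp [pvFindIdx, hc, pvAdvance, h]
    · have ih := pvAdvance_eq_find c cs (p + 1) (by omega)
      rw [hdrop]
      rw [pvAdvance]
      simp only [pvFindIdx, hc, dif_pos h]
      cases hf : pvFindIdx c (cs.drop (p + 1)) with
      | none => simp [hf] at ih ⊢; omega
      | some i => simp [hf] at ih ⊢; omega
  · have hpe : p = cs.length := by omega
    have : cs.drop p = [] := by simp [hpe]
    rw [this]
    simp only [pvFindIdx]
    rw [pvAdvance]
    simp [hpe]
termination_by cs.length - p

theorem pvAGo_eq_pvBGo (cs : List Char) (ms : List Char) (p : Nat) (hp : p ≤ cs.length) :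
    pvAGo ms (cs.drop p) = pvBGo cs ms p := by
  induction ms generalizing p with
  | nil => simp [pvAGo, pvBGo]
  | cons c ms ih =>
    have hadv := pvAdvance_eq_find c cs p hp
    cases hf : pvFindIdx c (cs.drop p) with
    | none =>
      rw [hf] at hadv
      simp [pvAGo, pvBGo, hf, hadv]
    | some i =>
      simp only [hf] at hadv
      have hi : i < (cs.drop p).length := pvFindIdx_lt hf
      simp only [List.length_drop] at hi
      have hne : p + i ≠ cs.length := by omega
      simp only [pvAGo, pvBGo, hf, hadv, if_neg hne, List.drop_drop]
      exact ih (p + i) (by omega)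

-- ===== VERDICT (by name: the statement is the Claim_ definition above) =====
theorem is_fzfmatch_spec : Claim_equal_is_fzfmatch := by
  intro m c _
  unfold Spec_is_fzfmatch is_fzfmatch is_fzfmatch_alt
  have := pvAGo_eq_pvBGo c.toList m.toList 0 (by omega)
  simpa using this
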